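-- pv_equiv track=rewrite | github.com/Kristofer-M/discord_bot | vtm.py | get_successesv
-- ===== SOURCE A (Python) =====
-- def get_successesv(numbers, hunger=None, target=None):
--     num_success = 0
--     num_crits = 0
--     for number in numbers:
--         if number >= 6:
--             num_success += 1
--             if number == 10:
--                 num_crits += 1
--                 if num_crits % 2 == 0:
--                     num_success += 2
--         elif number == 1:
--             num_success -= 1
--
--     to_send = f'Roll: `{numbers}` Successes: {num_success}'
--
--     if hunger is not None and target is not None:
--         hunger = int(hunger)
--         target = int(target)
--         hunger_roll = numbers[-1:-hunger - 1:-1]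
--
--         if num_success >= target:
--             hunger_result = 'Messy Critical!' if 10 in hunger_roll and num_crits > 0 else 'Success!'
--         else:
--             hunger_result = 'Bestial Failure!' if 1 in hunger_roll else 'Failure!'
--
--         to_send += f' **{hunger_result}**'
--
--     return to_send
-- ===== SOURCE B (Python) =====
-- def get_successesv(numbers, hunger=None, target=None):
--     tens = sum(1 for n in numbers if n == 10)
--     num_crits = tens
--     num_success = (sum(1 for n in numbers if n >= 6)
--                    - sum(1 for n in numbers if n == 1)
--                    + 2 * (tens // 2))
--
--     to_send = f'Roll: `{numbers}` Successes: {num_success}'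
--
--     if hunger is not None and target is not None:
--         hunger_roll = numbers[-1:-int(hunger) - 1:-1]
--         if num_success >= int(target):
--             hunger_result = 'Messy Critical!' if 10 in hunger_roll and num_crits > 0 else 'Success!'
--         else:
--             hunger_result = 'Bestial Failure!' if 1 in hunger_roll else 'Failure!'
--         to_send += f' **{hunger_result}**'
--
--     return to_send
-- ===== Notes on version B (the rewrite author's own statement) =====
-- stated objective: simpler
-- what changed: The running success/crit accumulator loop with its parity-triggered +2 bonus is replaced by three independent counts and the closed form count(>=6) - count(==1) + 2*(tens//2); the hunger/target formatting tail is unchanged.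
import Mathlib
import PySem

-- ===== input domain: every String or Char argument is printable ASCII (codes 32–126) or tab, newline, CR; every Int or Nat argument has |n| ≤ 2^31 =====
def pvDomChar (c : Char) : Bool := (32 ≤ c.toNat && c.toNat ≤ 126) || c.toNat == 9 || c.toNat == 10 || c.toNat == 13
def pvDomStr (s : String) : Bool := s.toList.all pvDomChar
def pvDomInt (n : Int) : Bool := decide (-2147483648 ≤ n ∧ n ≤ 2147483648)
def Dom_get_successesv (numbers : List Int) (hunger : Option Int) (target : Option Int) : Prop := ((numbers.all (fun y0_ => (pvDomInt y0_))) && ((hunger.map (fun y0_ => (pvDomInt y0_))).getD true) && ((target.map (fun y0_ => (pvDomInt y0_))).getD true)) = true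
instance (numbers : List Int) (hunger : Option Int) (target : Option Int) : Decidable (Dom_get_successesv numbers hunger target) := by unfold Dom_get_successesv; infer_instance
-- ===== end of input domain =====

-- B replaces the running accumulator (with its parity-triggered crit bonus) by three
-- independent counts and a closed form; objective: simpler.

-- ===== PORT A =====
-- str(list_of_ints), as Python's f-string renders `numbers` (exact for ints)
def pyListRepr (xs : List Int) : String :=
  "[" ++ PySem.Str.join ", " (xs.map PySem.Int.toStr) ++ "]"

-- A's for-loop over numbers, carrying (num_success, num_crits)
def aLoop : List Int → Int → Int → Int × Int
  | [], s, c => (s, c)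
  | n :: rest, s, c =>
    if 6 ≤ n then
      if n == 10 then
        let c' := c + 1
        if PySem.Int.mod c' 2 == 0 then aLoop rest (s + 1 + 2) c'
        else aLoop rest (s + 1) c'
      else aLoop rest (s + 1) c
    else if n == 1 then aLoop rest (s - 1) c
    else aLoop rest s c

def get_successesv (numbers : List Int) (hunger : Option Int) (target : Option Int) : String :=
  let sc := aLoop numbers 0 0
  let num_success := sc.1
  let num_crits := sc.2
  let to_send := "Roll: `" ++ pyListRepr numbers ++ "` Successes: " ++ PySem.Int.toStr num_success
  match hunger, target with
  | some h, some t =>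
    let hunger_roll := (PySem.List.slice? numbers (some (-1)) (some (-h - 1)) (-1)).getD []
    let hunger_result :=
      if num_success ≥ t then
        if hunger_roll.contains 10 && decide (num_crits > 0) then "Messy Critical!" else "Success!"
      else
        if hunger_roll.contains 1 then "Bestial Failure!" else "Failure!"
    to_send ++ " **" ++ hunger_result ++ "**"
  | _, _ => to_send

-- ===== PORT B =====
def get_successesv_alt (numbers : List Int) (hunger : Option Int) (target : Option Int) : String :=
  let tens : Int := (numbers.countP (fun n => n == 10) : Nat)
  let num_crits := tens
  let num_success : Int :=
    ((numbers.countP (fun n => decide (6 ≤ n)) : Nat) : Int)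
      - ((numbers.countP (fun n => n == 1) : Nat) : Int)
      + 2 * PySem.Int.floordiv tens 2
  let to_send := "Roll: `" ++ pyListRepr numbers ++ "` Successes: " ++ PySem.Int.toStr num_success
  match hunger with
  | none => to_send
  | some h =>
    match target with
    | none => to_send
    | some t =>
      let hunger_roll := (PySem.List.slice? numbers (some (-1)) (some (-h - 1)) (-1)).getD []
      let hunger_result :=
        if num_success ≥ t then
          if hunger_roll.contains 10 && decide (num_crits > 0) then "Messy Critical!" else "Success!"
        else
          if hunger_roll.contains 1 then "Bestial Failure!" else "Failure!"
      to_send ++ " **" ++ hunger_result ++ "**"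

-- ===== PRECONDITION & SPEC =====
def Spec_get_successesv (numbers : List Int) (hunger : Option Int) (target : Option Int) (out : String) : Prop := out = get_successesv_alt numbers hunger target
instance (numbers : List Int) (hunger : Option Int) (target : Option Int) (out : String) : Decidable (Spec_get_successesv numbers hunger target out) := by unfold Spec_get_successesv; infer_instance

-- ===== CLAIM (what is proved, stated in full; the proofs are below) =====
def Claim_equal_get_successesv : Prop := ∀ (numbers : List Int) (hunger : Option Int) (target : Option Int), Dom_get_successesv numbers hunger target → Spec_get_successesv numbers hunger target (get_successesv numbers hunger target)

-- ===== LEMMAS AND PROOFS =====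

-- loop invariant: starting from (s, k) with k ≥ 0, A's loop returns the closed form
theorem aLoop_closed (xs : List Int) (s : Int) (k : Nat) :
    aLoop xs s (k : Int) =
      (s + ((xs.countP (fun n => decide (6 ≤ n)) : Nat) : Int)
         - ((xs.countP (fun n => n == 1) : Nat) : Int)
         + 2 * (((k + xs.countP (fun n => n == 10)) / 2 : Nat) : Int)
         - 2 * ((k / 2 : Nat) : Int),
       ((k + xs.countP (fun n => n == 10) : Nat) : Int)) := by
  induction xs generalizing s k with
  | nil => simp [aLoop]
  | cons n rest ih =>
    simp only [aLoop, List.countP_cons]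
    by_cases h6 : 6 ≤ n
    · by_cases h10 : n = 10
      · subst h10
        have hk : (k : Int) + 1 = ((k + 1 : Nat) : Int) := by push_cast; ring
        have hm : PySem.Int.mod ((k + 1 : Nat) : Int) 2 = (((k + 1) % 2 : Nat) : Int) := by
          exact_mod_cast PySem.Int.mod_natCast (k + 1) 2
        have ih' : ∀ s' : Int, aLoop rest s' ((k : Int) + 1) =
            (s' + ((rest.countP (fun n => decide (6 ≤ n)) : Nat) : Int)
               - ((rest.countP (fun n => n == 1) : Nat) : Int)
               + 2 * ((((k + 1) + rest.countP (fun n => n == 10)) / 2 : Nat) : Int)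
               - 2 * (((k + 1) / 2 : Nat) : Int),
             (((k + 1) + rest.countP (fun n => n == 10) : Nat) : Int)) := by
          intro s'; rw [hk]; exact ih s' (k + 1)
        rw [hk, hm]
        by_cases hpar : (k + 1) % 2 = 0
        · have hd : (2:Int) ∣ (k : Int) + 1 := by omega
          simp [hd, ih', Prod.ext_iff]
          all_goals (push_cast; omega)
        · have hd : ¬ (2:Int) ∣ (k : Int) + 1 := by omega
          simp [hd, ih', Prod.ext_iff]
          all_goals (push_cast; omega)
      · have h1 : ¬ n = 1 := by omega
        simp [h6, h10, h1, ih, Prod.ext_iff]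
        all_goals (push_cast; omega)
    · have h10 : ¬ n = 10 := by omega
      by_cases h1 : n = 1
      · simp [h6, h10, h1, ih, Prod.ext_iff]
        all_goals (push_cast; omega)
      · simp [h6, h10, h1, ih, Prod.ext_iff]
        all_goals (push_cast; omega)

theorem aLoop_zero (xs : List Int) :
    aLoop xs 0 0 =
      (((xs.countP (fun n => decide (6 ≤ n)) : Nat) : Int)
         - ((xs.countP (fun n => n == 1) : Nat) : Int)
         + 2 * PySem.Int.floordiv ((xs.countP (fun n => n == 10) : Nat) : Int) 2,
       ((xs.countP (fun n => n == 10) : Nat) : Int)) := by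
  have h := aLoop_closed xs 0 0
  simp only [Nat.cast_zero] at h
  rw [h]
  have : PySem.Int.floordiv ((xs.countP (fun n => n == 10) : Nat) : Int) 2
      = (((xs.countP (fun n => n == 10)) / 2 : Nat) : Int) := by
    exact_mod_cast PySem.Int.floordiv_natCast (xs.countP (fun n => n == 10)) 2
  rw [this]
  simp [Prod.ext_iff]
  try omega

-- ===== VERDICT (by name: the statement is the Claim_ definition above) =====
theorem get_successesv_spec : Claim_equal_get_successesv := by
  intro numbers hunger target _
  unfold Spec_get_successesv get_successesv get_successesv_alt
  rw [aLoop_zero]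
  cases hunger <;> cases target <;> rfl
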